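-- pv_equiv track=rewrite | github.com/arnvudl/Automatic_CV | pipeline_ml/core/p02_features.py | _field_match
-- ===== SOURCE A (Python) =====
-- IT_KEYWORDS       = {"computer", "software", "data", "information", "it", "computing",
--                      "engineering", "technology", "networks", "cybersecurity", "ai"}
--
-- FINANCE_KEYWORDS  = {"finance", "accounting", "economics", "business", "management",
--                      "audit", "banking", "insurance", "financial"}
--
-- INDUSTRY_KEYWORDS = {"mechanical", "industrial", "production", "logistics", "supply",
--                      "manufacturing", "operations", "civil", "chemical"}
--
-- def _field_match(education_field, sector) -> int:
--     if not education_field or not sector: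
--         return 0
--     field  = str(education_field).lower()
--     sector = str(sector).upper()
--     if sector == "IT"       and any(k in field for k in IT_KEYWORDS):
--         return 1
--     if sector == "FINANCE"  and any(k in field for k in FINANCE_KEYWORDS):
--         return 1
--     if sector == "INDUSTRY" and any(k in field for k in INDUSTRY_KEYWORDS):
--         return 1
--     return 0
-- ===== SOURCE B (Python) =====
-- IT_KEYWORDS       = {"computer", "software", "data", "information", "it", "computing",
--                      "engineering", "technology", "networks", "cybersecurity", "ai"}
--
-- FINANCE_KEYWORDS  = {"finance", "accounting", "economics", "business", "management",
--                      "audit", "banking", "insurance", "financial"}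
--
-- INDUSTRY_KEYWORDS = {"mechanical", "industrial", "production", "logistics", "supply",
--                      "manufacturing", "operations", "civil", "chemical"}
--
-- SECTOR_MAP = {"IT": IT_KEYWORDS, "FINANCE": FINANCE_KEYWORDS, "INDUSTRY": INDUSTRY_KEYWORDS}
--
-- def _field_match(education_field, sector) -> int:
--     # Inverted search: instead of scanning each keyword for substring occurrence in the
--     # field, enumerate the field's substrings (one start position at a time, one slice per
--     # distinct keyword length) and test each slice by hash-set membership in the sector's
--     # keyword set.  Correct because a keyword occurs in the field iff some slice
--     # field[i:i+len(k)] equals it.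
--     if not education_field or not sector:
--         return 0
--     field = str(education_field).lower()
--     keys = SECTOR_MAP.get(str(sector).upper(), set())
--     lens = {len(k) for k in keys}
--     for i in range(len(field)):
--         if any(field[i:i+L] in keys for L in lens):
--             return 1
--     return 0
-- ===== Notes on version B (the rewrite author's own statement) =====
-- stated objective: alternative
-- what changed: Search direction is inverted: instead of per-sector branches each scanning every keyword for substring occurrence in the field, B enumerates the field's substrings (one start position, one slice per distinct keyword length) and tests each slice by hash-set membership in the sector's keyword set obtained from a sector->keywords table.
import Mathlib
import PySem

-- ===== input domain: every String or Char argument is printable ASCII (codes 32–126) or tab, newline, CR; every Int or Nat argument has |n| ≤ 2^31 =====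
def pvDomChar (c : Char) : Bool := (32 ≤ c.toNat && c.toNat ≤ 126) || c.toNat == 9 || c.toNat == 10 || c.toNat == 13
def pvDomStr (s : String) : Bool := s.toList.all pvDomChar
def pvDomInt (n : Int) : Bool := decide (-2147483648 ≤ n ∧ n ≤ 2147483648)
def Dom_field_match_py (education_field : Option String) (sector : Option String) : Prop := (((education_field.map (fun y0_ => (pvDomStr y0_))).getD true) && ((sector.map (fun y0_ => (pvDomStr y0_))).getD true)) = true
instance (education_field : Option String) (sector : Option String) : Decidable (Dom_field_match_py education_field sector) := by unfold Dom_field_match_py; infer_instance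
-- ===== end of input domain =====

-- ===== PORT A =====
-- B inverts the search: A scans each keyword of the selected sector for substring occurrence
-- in the field; B enumerates the field's substrings (one slice per start position and
-- distinct keyword length) and tests each by set membership (objective: alternative).
def IT_KEYWORDS : List String := ["computer", "software", "data", "information", "it", "computing",
  "engineering", "technology", "networks", "cybersecurity", "ai"]
def FINANCE_KEYWORDS : List String := ["finance", "accounting", "economics", "business", "management",
  "audit", "banking", "insurance", "financial"]
def INDUSTRY_KEYWORDS : List String := ["mechanical", "industrial", "production", "logistics", "supply",
  "manufacturing", "operations", "civil", "chemical"]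

def field_match_py (education_field : Option String) (sector : Option String) : Int :=
  match education_field, sector with
  | none, _ => 0
  | _, none => 0
  | some ef, some se =>
    if ef == "" || se == "" then 0
    else
      let field := PySem.Str.lower ef
      let sector := PySem.Str.upper se
      if sector == "IT" && IT_KEYWORDS.any (fun k => PySem.Str.isIn k field) then 1
      else if sector == "FINANCE" && FINANCE_KEYWORDS.any (fun k => PySem.Str.isIn k field) then 1
      else if sector == "INDUSTRY" && INDUSTRY_KEYWORDS.any (fun k => PySem.Str.isIn k field) then 1
      else 0

-- ===== PORT B =====
def SECTOR_MAP : PySem.Dict String (List String) :=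
  PySem.Dict.ofList [("IT", IT_KEYWORDS), ("FINANCE", FINANCE_KEYWORDS), ("INDUSTRY", INDUSTRY_KEYWORDS)]

def field_match_py_alt (education_field : Option String) (sector : Option String) : Int :=
  match education_field, sector with
  | none, _ => 0
  | _, none => 0
  | some ef, some se =>
    if ef == "" || se == "" then 0
    else
      let field := (PySem.Str.lower ef).toList
      let keys := (PySem.Dict.get? SECTOR_MAP (PySem.Str.upper se)).getD []
      let lens := PySem.Set.ofList (keys.map (fun k => PySem.Str.len k))
      if (List.range field.length).any (fun i =>
            lens.any (fun L =>
              (keys.map String.toList).contains (PySem.List.slice field (some (i : Int)) (some ((i : Int) + L)))))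
      then 1 else 0

-- ===== PRECONDITION & SPEC =====
def Spec_field_match_py (education_field : Option String) (sector : Option String) (out : Int) : Prop := out = field_match_py_alt education_field sector
instance (education_field : Option String) (sector : Option String) (out : Int) : Decidable (Spec_field_match_py education_field sector out) := by unfold Spec_field_match_py; infer_instance

-- ===== CLAIM (what is proved, stated in full; the proofs are below) =====
def Claim_equal_field_match_py : Prop := ∀ (education_field : Option String) (sector : Option String), Dom_field_match_py education_field sector → Spec_field_match_py education_field sector (field_match_py education_field sector)

-- ===== LEMMAS AND PROOFS =====

-- the substring-enumeration scan over a keyword list K (all keywords nonempty) finds a hit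
-- exactly when some keyword is a substring of the field
theorem scan_eq_any (K : List String) (field : List Char)
    (hne : ∀ k ∈ K, k.toList ≠ []) :
    ((List.range field.length).any (fun i =>
        (PySem.Set.ofList (K.map (fun k => PySem.Str.len k))).any
          (fun L => (K.map String.toList).contains
            (PySem.List.slice field (some (i : Int)) (some ((i : Int) + L))))))
      = K.any (fun k => PySem.Chars.isIn k.toList field) := by
  rw [Bool.eq_iff_iff]
  simp only [List.any_eq_true, List.mem_range, List.contains_eq_mem, List.mem_map,
    PySem.Chars.isIn_iff_infix, decide_eq_true_eq]
  constructor
  · rintro ⟨i, _, L, hL, k, hkK, hk⟩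
    obtain ⟨k', _, hk'⟩ := List.mem_map.mp ((PySem.Set.mem_ofList _ _).mp hL)
    rw [← hk', PySem.Str.len_eq, PySem.List.slice_natCast_add] at hk
    exact ⟨k, hkK, hk ▸ ((List.take_prefix _ _).isInfix.trans (field.drop_suffix i).isInfix)⟩
  · rintro ⟨k, hkK, s, t, hst⟩
    have hlen : 0 < k.toList.length := List.length_pos_iff.mpr (hne k hkK)
    refine ⟨s.length, ?_, PySem.Str.len k, ?_, k, hkK, ?_⟩
    · subst hst; simp only [List.length_append]; omega
    · exact (PySem.Set.mem_ofList _ _).mpr (List.mem_map.mpr ⟨k, hkK, rfl⟩)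
    · subst hst
      rw [PySem.Str.len_eq, PySem.List.slice_natCast_add, List.append_assoc, List.drop_left]
      exact (List.take_left' rfl).symm

-- ===== VERDICT (by name: the statement is the Claim_ definition above) =====
theorem field_match_py_spec : Claim_equal_field_match_py := by
  intro ef se _
  unfold Spec_field_match_py field_match_py field_match_py_alt
  match ef, se with
  | none, _ => rfl
  | some f, none => rfl
  | some f, some s =>
    simp only []
    split
    · rfl
    · by_cases h1 : PySem.Str.upper s = "IT"
      · rw [h1, show (PySem.Dict.get? SECTOR_MAP "IT").getD [] = IT_KEYWORDS from rfl,
          scan_eq_any IT_KEYWORDS _ (by decide)]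
        simp [PySem.Str.isIn_eq]
      · by_cases h2 : PySem.Str.upper s = "FINANCE"
        · rw [h2, show (PySem.Dict.get? SECTOR_MAP "FINANCE").getD [] = FINANCE_KEYWORDS from rfl,
            scan_eq_any FINANCE_KEYWORDS _ (by decide)]
          simp [PySem.Str.isIn_eq]
        · by_cases h3 : PySem.Str.upper s = "INDUSTRY"
          · rw [h3, show (PySem.Dict.get? SECTOR_MAP "INDUSTRY").getD [] = INDUSTRY_KEYWORDS from rfl,
              scan_eq_any INDUSTRY_KEYWORDS _ (by decide)]
            simp [PySem.Str.isIn_eq]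
          · have b1 : (("IT" : String) == PySem.Str.upper s) = false := by
              rw [beq_eq_false_iff_ne]; exact fun h => h1 h.symm
            have b2 : (("FINANCE" : String) == PySem.Str.upper s) = false := by
              rw [beq_eq_false_iff_ne]; exact fun h => h2 h.symm
            have b3 : (("INDUSTRY" : String) == PySem.Str.upper s) = false := by
              rw [beq_eq_false_iff_ne]; exact fun h => h3 h.symm
            have b1' : (PySem.Str.upper s == "IT") = false := by rw [beq_eq_false_iff_ne]; exact h1
            have b2' : (PySem.Str.upper s == "FINANCE") = false := by rw [beq_eq_false_iff_ne]; exact h2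
            have b3' : (PySem.Str.upper s == "INDUSTRY") = false := by rw [beq_eq_false_iff_ne]; exact h3
            have hnone : PySem.Dict.get? SECTOR_MAP (PySem.Str.upper s) = none := by
              rw [show SECTOR_MAP
                  = PySem.Dict.mk [("IT", IT_KEYWORDS), ("FINANCE", FINANCE_KEYWORDS), ("INDUSTRY", INDUSTRY_KEYWORDS)] from rfl]
              simp [PySem.Dict.get?, List.find?, b1, b2, b3]
            rw [hnone]
            simp [b1', b2', b3']
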